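-- pv_equiv track=rewrite | github.com/reebxu459/aoc_2025 | day2/prog.py | has_dup_digit_2
-- ===== SOURCE A (Python) =====
-- def has_dup_digit_2(num: int):
--     num = str(num)
--     length = len(num)
--     for i in range(1, length):
--         if length % i == 0:
--             substring = num[:i]
--             is_invalid = True
--             for j in range(0, length-i+1, i):
--                 if substring != num[j:j+i]:
--                     is_invalid = False
--             if is_invalid: return True
--     return False
-- ===== SOURCE B (Python) =====
-- def has_dup_digit_2(num: int):
--     s = str(num)
--     return s in (s + s)[1:-1]
-- ===== Notes on version B (the rewrite author's own statement) =====
-- stated objective: simpler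
-- what changed: Replaced the divisor loop with block-by-block comparisons by the standard string-periodicity identity: s is a repetition of a proper substring iff s occurs in (s+s)[1:-1], computed with a single substring membership test.
import Mathlib
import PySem

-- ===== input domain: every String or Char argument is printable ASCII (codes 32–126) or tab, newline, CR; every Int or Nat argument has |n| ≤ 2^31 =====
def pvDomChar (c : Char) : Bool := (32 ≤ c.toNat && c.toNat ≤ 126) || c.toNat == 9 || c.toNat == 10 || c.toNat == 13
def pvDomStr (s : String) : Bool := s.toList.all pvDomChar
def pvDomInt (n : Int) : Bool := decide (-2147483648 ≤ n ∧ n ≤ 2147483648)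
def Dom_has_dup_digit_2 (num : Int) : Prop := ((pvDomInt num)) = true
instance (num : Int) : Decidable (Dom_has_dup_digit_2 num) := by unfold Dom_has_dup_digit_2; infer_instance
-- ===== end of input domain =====

-- B replaces A's divisor loop with block comparisons by one substring-membership test: s is a
-- repetition of a proper substring iff s occurs in (s+s)[1:-1] (objective: simpler).

-- ===== PORT A =====
-- outer loop 'for i in range(1, length)' with its early return; the inner flag loop is the foldl
def hddLoopA (s : List Char) (length : Int) : List Int → Bool
  | [] => false
  | i :: rest =>
    if PySem.Int.mod length i = 0 then
      let substring := PySem.List.slice s none (some i)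
      let is_invalid := (PySem.List.pyRange 0 (length - i + 1) i).foldl
        (fun b j => if substring ≠ PySem.List.slice s (some j) (some (j + i)) then false else b) true
      if is_invalid then true else hddLoopA s length rest
    else hddLoopA s length rest

def has_dup_digit_2 (num : Int) : Bool :=
  let s : List Char := (PySem.Int.toStr num).toList
  let length : Int := (s.length : Int)
  hddLoopA s length (PySem.List.pyRange 1 length 1)

-- ===== PORT B =====
def has_dup_digit_2_alt (num : Int) : Bool :=
  let s : List Char := (PySem.Int.toStr num).toList
  PySem.Chars.isIn s (PySem.List.slice (s ++ s) (some 1) (some (-1)))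

-- ===== PRECONDITION & SPEC =====
def Spec_has_dup_digit_2 (num : Int) (out : Bool) : Prop := out = has_dup_digit_2_alt num
instance (num : Int) (out : Bool) : Decidable (Spec_has_dup_digit_2 num out) := by unfold Spec_has_dup_digit_2; infer_instance

-- ===== CLAIM (what is proved, stated in full; the proofs are below) =====
def Claim_equal_has_dup_digit_2 : Prop := ∀ (num : Int), Dom_has_dup_digit_2 num → Spec_has_dup_digit_2 num (has_dup_digit_2 num)

-- ===== LEMMAS AND PROOFS =====

-- l has cyclic period j : shifting every index by j modulo the length fixes l
def hddCyc (l : List Char) (j : Nat) : Prop :=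
  ∀ m, m < l.length → l[m]? = l[(m + j) % l.length]?

-- l is determined by its first d characters repeated
def hddRep (l : List Char) (d : Nat) : Prop :=
  ∀ m, m < l.length → l[m]? = l[m % d]?

-- every aligned block of length d equals the first block (what A's inner loop checks)
def hddBlocks (l : List Char) (d : Nat) : Prop :=
  ∀ k : Nat, k * d + d ≤ l.length → (l.drop (k * d)).take d = l.take d

theorem hddCyc_len (l : List Char) : hddCyc l l.length := by
  intro m hm
  rw [Nat.add_mod_right, Nat.mod_eq_of_lt hm]

theorem hddCyc_add (l : List Char) (a b : Nat) (ha : hddCyc l a) (hb : hddCyc l b) :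
    hddCyc l (a + b) := by
  intro m hm
  have hn : 0 < l.length := by omega
  have h1 := ha m hm
  have h2 := hb ((m + a) % l.length) (Nat.mod_lt _ hn)
  rw [h1, h2]
  congr 1
  rw [Nat.mod_add_mod, Nat.add_assoc]

theorem hddCyc_congr (l : List Char) (a b : Nat) (h : a % l.length = b % l.length)
    (ha : hddCyc l a) : hddCyc l b := by
  intro m hm
  rw [ha m hm]
  congr 1
  rw [Nat.add_mod, h, ← Nat.add_mod]

theorem hddCyc_mul (l : List Char) (a : Nat) (ha : hddCyc l a) (k : Nat) : hddCyc l (k * a) := by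
  induction k with
  | zero => intro m hm; simp [Nat.mod_eq_of_lt hm]
  | succ k ih =>
      have := hddCyc_add l (k * a) a ih ha
      simpa [Nat.succ_mul] using this

theorem hddCyc_inv (l : List Char) (a : Nat) (hn : 0 < l.length) (ha : hddCyc l a) :
    hddCyc l (l.length - a % l.length) := by
  intro m hm
  set n := l.length with hnn
  have hm' : (m + (n - a % n)) % n < n := Nat.mod_lt _ hn
  have h := ha _ hm'
  rw [h]
  congr 1
  have har : a % n < n := Nat.mod_lt _ hn
  have h3 := Nat.mod_add_div a n
  rw [Nat.mod_add_mod]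
  have e1 : m + (n - a % n) + a = m + n + n * (a / n) := by omega
  rw [e1, Nat.add_mul_mod_self_left, Nat.add_mod_right, Nat.mod_eq_of_lt hm]

theorem hddCyc_mod (l : List Char) (a b : Nat)
    (ha : hddCyc l a) (hb : hddCyc l b) : hddCyc l (b % a) := by
  rcases Nat.eq_zero_or_pos l.length with hn | hn
  · intro m hm; omega
  · set n := l.length with hnn
    have hinv : hddCyc l (n - a % n) := hddCyc_inv l a hn ha
    have hc : hddCyc l (b + (b / a) * (n - a % n)) :=
      hddCyc_add l b _ hb (hddCyc_mul l _ hinv (b / a))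
    refine hddCyc_congr l _ _ ?_ hc
    have h1 : a % n ≤ n := Nat.le_of_lt (Nat.mod_lt _ hn)
    have h2 : b % a + a * (b / a) = b := Nat.mod_add_div b a
    have h3 : a % n + n * (a / n) = a := Nat.mod_add_div a n
    have key : b + b / a * (n - a % n) = b % a + n * (b / a * (a / n) + b / a) := by
      have e1 : n - a % n + a = n * (a / n) + n := by omega
      have e2 : b / a * (n - a % n) + b / a * a = b / a * (n * (a / n) + n) := by
        rw [← Nat.mul_add, e1]
      have e3 : b / a * a = a * (b / a) := Nat.mul_comm _ _
      have e4 : b / a * (n * (a / n) + n) = n * (b / a * (a / n) + b / a) := by ring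
      omega
    rw [key, Nat.add_mul_mod_self_left]

theorem hddCyc_gcd (l : List Char) (a b : Nat) (ha : hddCyc l a) (hb : hddCyc l b) :
    hddCyc l (Nat.gcd a b) := by
  revert ha hb
  induction a, b using Nat.gcd.induction with
  | H0 b' => intro _ hb; simpa using hb
  | H1 a' b' _hpos ih =>
      intro ha hb
      rw [Nat.gcd_rec]
      exact ih (hddCyc_mod l a' b' ha hb) ha

theorem hddRep_of_cyc (l : List Char) (d : Nat) (hd : 0 < d)
    (hc : hddCyc l d) : hddRep l d := by
  intro m hm
  induction m using Nat.strong_induction_on with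
  | _ m ih =>
      by_cases hmd : m < d
      · rw [Nat.mod_eq_of_lt hmd]
      · push_neg at hmd
        have h1 : m - d < l.length := by omega
        have h2 := hc (m - d) h1
        have h3 : (m - d + d) % l.length = m := by
          rw [Nat.sub_add_cancel hmd, Nat.mod_eq_of_lt hm]
        rw [h3] at h2
        have h4 := ih (m - d) (by omega) h1
        have h5 : (m - d) % d = m % d := by
          conv_rhs => rw [← Nat.sub_add_cancel hmd]
          rw [Nat.add_mod_right]
        rw [← h2, h4, h5]

theorem hddCyc_of_rep (l : List Char) (d : Nat) (hdvd : d ∣ l.length)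
    (hr : hddRep l d) : hddCyc l d := by
  intro m hm
  obtain ⟨t, ht⟩ := hdvd
  have hdle : d ≤ l.length := Nat.le_of_dvd (by omega) ⟨t, ht⟩
  by_cases hcase : m + d < l.length
  · have h1 := hr m hm
    have h2 := hr (m + d) hcase
    rw [Nat.mod_eq_of_lt hcase, h1, h2]
    congr 1
    exact (Nat.add_mod_right m d).symm
  · have hge : l.length ≤ m + d := by omega
    have hmod : (m + d) % l.length = m + d - l.length := by
      rw [Nat.mod_eq_sub_mod hge, Nat.mod_eq_of_lt (by omega)]
    have h1 := hr m hm
    have h2 := hr (m + d - l.length) (by omega)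
    rw [hmod, h1, h2]
    congr 1
    have e1 : m + d = (m + d - l.length) + d * t := by omega
    calc m % d = (m + d) % d := (Nat.add_mod_right m d).symm
      _ = ((m + d - l.length) + d * t) % d := by rw [← e1]
      _ = (m + d - l.length) % d := by rw [Nat.mul_comm, Nat.add_mul_mod_self_right]

theorem hddRep_iff_blocks (l : List Char) (d : Nat) (hd : 0 < d) (hdvd : d ∣ l.length) :
    hddRep l d ↔ hddBlocks l d := by
  constructor
  · intro hr k hk
    apply List.ext_getElem?
    intro b
    by_cases hb : b < d
    · rw [List.getElem?_take, List.getElem?_take, if_pos hb, if_pos hb, List.getElem?_drop]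
      have h1 := hr (k * d + b) (by omega)
      have h2 : (k * d + b) % d = b := by
        rw [Nat.add_comm, Nat.add_mul_mod_self_right, Nat.mod_eq_of_lt hb]
      rw [h1, h2]
    · rw [List.getElem?_take, List.getElem?_take, if_neg hb, if_neg hb]
  · intro hb m hm
    obtain ⟨t, ht⟩ := hdvd
    have hcm : d * t = t * d := Nat.mul_comm d t
    have hk : m / d * d + d ≤ l.length := by
      have h1 : m / d * d ≤ m := Nat.div_mul_le_self m d
      have h2 : m / d < t := by
        by_contra h
        have h3 : t * d ≤ m / d * d := Nat.mul_le_mul_right d (by omega)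
        omega
      have h4 : (m / d + 1) * d ≤ t * d := Nat.mul_le_mul_right d (by omega)
      have h5 : (m / d + 1) * d = m / d * d + d := by ring
      omega
    have heq := hb (m / d) hk
    have hmd : m % d < d := Nat.mod_lt _ hd
    have hthis := congrArg (fun xs => xs[m % d]?) heq
    simp only [List.getElem?_take, List.getElem?_drop, if_pos hmd] at hthis
    have e : m / d * d + m % d = m := by
      have e1 := Nat.div_add_mod m d
      have e2 : d * (m / d) = m / d * d := Nat.mul_comm _ _
      omega
    rw [e] at hthis
    exact hthis

-- the rotation-by-p fixed-point equation is exactly cyclic period p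
theorem hddRot_iff_cyc (l : List Char) (p : Nat) (hp : p ≤ l.length) :
    (l.drop p ++ l.take p = l) ↔ hddCyc l p := by
  have hlen : (l.drop p ++ l.take p).length = l.length := by
    rw [List.length_append, List.length_drop, List.length_take]; omega
  constructor
  · intro heq m hm
    by_cases hc : m < l.length - p
    · have h1 : (l.drop p ++ l.take p)[m]? = (l.drop p)[m]? := by
        rw [List.getElem?_append_left (by simpa using hc)]
      rw [List.getElem?_drop] at h1
      have hmod : (m + p) % l.length = p + m := by
        rw [Nat.mod_eq_of_lt (by omega)]; exact Nat.add_comm m p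
      rw [hmod, ← h1, heq]
    · push_neg at hc
      have h1 : (l.drop p ++ l.take p)[m]? = (l.take p)[m - (l.length - p)]? := by
        rw [List.getElem?_append_right (by simpa using hc)]
        simp
      have h2 : m - (l.length - p) < p := by omega
      rw [List.getElem?_take, if_pos h2] at h1
      have hmod : (m + p) % l.length = m - (l.length - p) := by
        have h3 : (m + p) % l.length = m + p - l.length := by
          rw [Nat.mod_eq_sub_mod (by omega)]
          exact Nat.mod_eq_of_lt (by omega)
        omega
      rw [hmod, ← h1, heq]
  · intro hc
    apply List.ext_getElem?
    intro k
    by_cases hk : k < l.length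
    · by_cases hc2 : k < l.length - p
      · rw [List.getElem?_append_left (by simpa using hc2), List.getElem?_drop]
        have := hc k hk
        have hmod : (k + p) % l.length = p + k := by
          rw [Nat.mod_eq_of_lt (by omega)]; exact Nat.add_comm k p
        rw [this, hmod]
      · push_neg at hc2
        rw [List.getElem?_append_right (by simpa using hc2)]
        have h2 : k - (l.length - p) < p := by omega
        simp only [List.length_drop]
        rw [List.getElem?_take, if_pos h2]
        have := hc k hk
        have hmod : (k + p) % l.length = k - (l.length - p) := by
          have h3 : (k + p) % l.length = k + p - l.length := by
            rw [Nat.mod_eq_sub_mod (by omega)]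
            exact Nat.mod_eq_of_lt (by omega)
          omega
        rw [this, hmod]
    · rw [List.getElem?_eq_none (by omega), List.getElem?_eq_none (by simpa [hlen] using hk)]

-- inner flag loop: the flag is true iff no range element trips it
theorem hddFoldFlag (p : Int → Prop) [DecidablePred p] (js : List Int) (b : Bool) :
    (js.foldl (fun acc j => if p j then false else acc) b = true) ↔
      (b = true ∧ ∀ j ∈ js, ¬ p j) := by
  induction js generalizing b with
  | nil => simp
  | cons j js ih =>
      simp only [List.foldl_cons, ih, List.mem_cons]
      by_cases hp : p j
      · rw [if_pos hp]
        simp only [Bool.false_eq_true, false_and, false_iff, not_and]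
        intro _ h
        exact h j (Or.inl rfl) hp
      · rw [if_neg hp]
        constructor
        · rintro ⟨hb, h⟩
          refine ⟨hb, ?_⟩
          rintro j' (rfl | hj')
          · exact hp
          · exact h j' hj'
        · rintro ⟨hb, h⟩
          exact ⟨hb, fun j' hj' => h j' (Or.inr hj')⟩

-- A's outer loop returns true iff some listed i passes its test
theorem hddLoopA_iff (s : List Char) (n : Int) (is : List Int) :
    hddLoopA s n is = true ↔
      ∃ i ∈ is, PySem.Int.mod n i = 0 ∧
        ((PySem.List.pyRange 0 (n - i + 1) i).foldl
          (fun b j => if PySem.List.slice s none (some i) ≠ PySem.List.slice s (some j) (some (j + i)) then false else b) true) = true := by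
  induction is with
  | nil => simp [hddLoopA]
  | cons i rest ih =>
      simp only [hddLoopA]
      by_cases hm : PySem.Int.mod n i = 0
      · simp only [if_pos hm]
        by_cases hf : ((PySem.List.pyRange 0 (n - i + 1) i).foldl
            (fun b j => if PySem.List.slice s none (some i) ≠ PySem.List.slice s (some j) (some (j + i)) then false else b) true) = true
        · rw [if_pos hf]
          constructor
          · intro _; exact ⟨i, List.mem_cons_self, hm, hf⟩
          · intro _; rfl
        · rw [if_neg hf, ih]
          constructor
          · rintro ⟨i', hi', h⟩; exact ⟨i', List.mem_cons_of_mem _ hi', h⟩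
          · rintro ⟨i', hi', h⟩
            rcases List.mem_cons.mp hi' with rfl | hmem
            · exact absurd h.2 hf
            · exact ⟨i', hmem, h⟩
      · rw [if_neg hm, ih]
        constructor
        · rintro ⟨i', hi', h⟩; exact ⟨i', List.mem_cons_of_mem _ hi', h⟩
        · rintro ⟨i', hi', h⟩
          rcases List.mem_cons.mp hi' with rfl | hmem
          · exact absurd h.1 hm
          · exact ⟨i', hmem, h⟩

-- port A computes: some proper divisor's blocks all match
theorem hddPortA_iff (l : List Char) :
    (hddLoopA l (l.length : Int) (PySem.List.pyRange 1 (l.length : Int) 1) = true) ↔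
      ∃ d : Nat, 1 ≤ d ∧ d < l.length ∧ d ∣ l.length ∧ hddBlocks l d := by
  rw [hddLoopA_iff]
  constructor
  · rintro ⟨i, hi, hmod, hfold⟩
    rw [PySem.List.mem_pyRange_one] at hi
    obtain ⟨hi1, hi2⟩ := hi
    have hid : i = ((i.toNat : Nat) : Int) := by omega
    set d := i.toNat with hdd
    have hdvd : d ∣ l.length := by
      have h := (PySem.Int.mod_eq_zero_iff_dvd _ _).mp hmod
      rw [hid] at h
      exact_mod_cast h
    refine ⟨d, by omega, by omega, hdvd, ?_⟩
    rw [hddFoldFlag (fun j => PySem.List.slice l none (some i) ≠ PySem.List.slice l (some j) (some (j + i)))] at hfold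
    obtain ⟨-, hall⟩ := hfold
    intro k hk
    have hjmem : ((k * d : Nat) : Int) ∈ PySem.List.pyRange 0 ((l.length : Int) - i + 1) i := by
      rw [PySem.List.mem_pyRange_iff_of_pos (by omega)]
      refine ⟨by positivity, by push_cast; omega, ?_⟩
      rw [hid]
      exact ⟨(k : Int), by push_cast; ring⟩
    have h2 := hall _ hjmem
    rw [not_ne_iff] at h2
    rw [hid] at h2
    rw [PySem.List.slice_to_natCast] at h2
    rw [PySem.List.slice_natCast_add] at h2
    exact h2.symm
  · rintro ⟨d, h1, h2, h3, hblocks⟩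
    refine ⟨(d : Int), ?_, ?_, ?_⟩
    · rw [PySem.List.mem_pyRange_one]
      constructor <;> [exact_mod_cast h1; exact_mod_cast h2]
    · exact (PySem.Int.mod_eq_zero_iff_dvd _ _).mpr (by exact_mod_cast h3)
    · rw [hddFoldFlag (fun j => PySem.List.slice l none (some ((d : Nat) : Int)) ≠ PySem.List.slice l (some j) (some (j + ((d : Nat) : Int))))]
      refine ⟨rfl, ?_⟩
      intro j hj
      rw [PySem.List.mem_pyRange_iff_of_pos (by omega)] at hj
      obtain ⟨hj0, hjlt, hjdvd⟩ := hj
      obtain ⟨c, hc⟩ := hjdvd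
      have hc0 : 0 ≤ c := by nlinarith
      have hj' : j = (d : Int) * c := by omega
      have hjc : j = ((c.toNat * d : Nat) : Int) := by
        push_cast
        rw [Int.toNat_of_nonneg hc0, hj', mul_comm]
      rw [not_ne_iff, hjc, PySem.List.slice_to_natCast]
      rw [PySem.List.slice_natCast_add]
      exact (hblocks c.toNat (by omega)).symm

-- port B computes: l occurs properly inside l ++ l
theorem hddPortB_iff (l : List Char) (hne : l ≠ []) :
    (PySem.Chars.isIn l (PySem.List.slice (l ++ l) (some 1) (some (-1))) = true) ↔
      ∃ p : Nat, 1 ≤ p ∧ p < l.length ∧ hddCyc l p := by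
  have hn : 0 < l.length := List.length_pos_of_ne_nil hne
  have ht : PySem.List.slice (l ++ l) (some 1) (some (-1)) = ((l ++ l).drop 1).take (2*l.length - 2) := by
    unfold PySem.List.slice
    simp only [PySem.List.clampIdx_neg_one, List.length_append]
    have h1 : PySem.List.clampIdx (l.length + l.length) 1 = 1 := by
      simp [PySem.List.clampIdx]; omega
    rw [h1]
    congr 1
    omega
  rw [ht, ← PySem.Chars.exists_prefix_drop_iff_isIn]
  have hX : ∀ p : Nat, p ≤ l.length → ((l ++ l).drop p).take l.length = l.drop p ++ l.take p := by
    intro p hp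
    rw [List.drop_append_of_le_length hp, List.take_append, List.take_of_length_le (by simp)]
    have e : l.length - (l.drop p).length = p := by simp; omega
    rw [e]
  have hdropt : ∀ j : Nat, (((l ++ l).drop 1).take (2*l.length - 2)).drop j
      = ((l ++ l).drop (1 + j)).take (2*l.length - 2 - j) := by
    intro j
    rw [List.drop_take, List.drop_drop]
  constructor
  · rintro ⟨j, hpre⟩
    rw [hdropt j] at hpre
    have hdl : ((l ++ l).drop (1 + j)).length = 2*l.length - (1 + j) := by simp; omega
    have htl := hpre.length_le
    rw [List.length_take, hdl] at htl
    have hj2 : j + 2 ≤ l.length := by omega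
    have hpre2 : l <+: (l ++ l).drop (1 + j) := hpre.trans (List.take_prefix _ _)
    have heq : l = ((l ++ l).drop (1 + j)).take l.length := List.prefix_iff_eq_take.mp hpre2
    rw [hX (1 + j) (by omega)] at heq
    refine ⟨1 + j, by omega, by omega, (hddRot_iff_cyc l (1 + j) (by omega)).mp heq.symm⟩
  · rintro ⟨p, hp1, hp2, hcyc⟩
    have hrot := (hddRot_iff_cyc l p (by omega)).mpr hcyc
    refine ⟨p - 1, ?_⟩
    rw [hdropt (p - 1)]
    have e1 : 1 + (p - 1) = p := by omega
    rw [e1]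
    have heq : l = ((l ++ l).drop p).take l.length := by rw [hX p (by omega)]; exact hrot.symm
    rw [List.prefix_iff_eq_take, List.take_take, min_eq_left (by omega)]
    exact heq

theorem hddMain (l : List Char) :
    (∃ d : Nat, 1 ≤ d ∧ d < l.length ∧ d ∣ l.length ∧ hddBlocks l d) ↔
      ∃ p : Nat, 1 ≤ p ∧ p < l.length ∧ hddCyc l p := by
  constructor
  · rintro ⟨d, h1, h2, h3, h4⟩
    exact ⟨d, h1, h2, hddCyc_of_rep l d h3 ((hddRep_iff_blocks l d h1 h3).mpr h4)⟩
  · rintro ⟨p, h1, h2, h3⟩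
    have hn : 0 < l.length := by omega
    refine ⟨Nat.gcd p l.length, ?_, ?_, Nat.gcd_dvd_right _ _, ?_⟩
    · have := Nat.gcd_pos_of_pos_right p hn; omega
    · have := Nat.gcd_dvd_left p l.length
      have := Nat.le_of_dvd (by omega) this
      omega
    · have hg : hddCyc l (Nat.gcd p l.length) := hddCyc_gcd l p l.length h3 (hddCyc_len l)
      have hgpos : 0 < Nat.gcd p l.length := Nat.gcd_pos_of_pos_right p hn
      exact (hddRep_iff_blocks l _ hgpos (Nat.gcd_dvd_right _ _)).mp
        (hddRep_of_cyc l _ hgpos hg)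

theorem hddToStr_ne_nil (num : Int) : (PySem.Int.toStr num).toList ≠ [] := by
  have h : PySem.Int.toChars num ≠ [] := by
    unfold PySem.Int.toChars
    split
    · simp
    · exact List.ne_nil_of_length_pos Nat.length_toDigits_pos
  simpa [PySem.Int.toStr] using h

-- ===== VERDICT (by name: the statement is the Claim_ definition above) =====
theorem has_dup_digit_2_spec : Claim_equal_has_dup_digit_2 := by
  intro num _
  unfold Spec_has_dup_digit_2 has_dup_digit_2 has_dup_digit_2_alt
  set l := (PySem.Int.toStr num).toList with hl
  have hne : l ≠ [] := hddToStr_ne_nil num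
  rw [Bool.eq_iff_iff]
  rw [hddPortA_iff l, hddPortB_iff l hne]
  exact hddMain l
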